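-- pv_equiv track=rewrite | github.com/Marco-Ezquerra/Probabilidades-Mus | utils/mascaras_descarte.py | encontrar_mascara
-- ===== SOURCE A (Python) =====
-- def encontrar_mascara(cartas_a_descartar, mano):
--     """
--     Encuentra el índice de la máscara que descarta las cartas especificadas.
--
--     Útil para convertir decisiones heurísticas en índices de máscara.
--
--     Args:
--         cartas_a_descartar: Lista de cartas a descartar
--         mano: Mano original de 4 cartas
--
--     Returns:
--         tuple: Tupla de índices que corresponde a la máscara
--
--     Ejemplo:
--         >>> encontrar_mascara([12, 12], [12, 12, 11, 10])
--         (0, 1)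
--     """
--     indices = []
--     mano_copia = list(mano)
--
--     for carta in cartas_a_descartar:
--         if carta in mano_copia:
--             idx = mano_copia.index(carta)
--             indices.append(idx)
--             mano_copia[idx] = None  # Marcar como usada
--
--     return tuple(sorted(indices))
-- ===== SOURCE B (Python) =====
-- def encontrar_mascara(cartas_a_descartar, mano):
--     restante = {}
--     for carta in cartas_a_descartar:
--         restante[carta] = restante.get(carta, 0) + 1
--     indices = []
--     for i, carta in enumerate(mano):
--         if restante.get(carta, 0) > 0:
--             indices.append(i)
--             restante[carta] = restante.get(carta, 0) - 1
--     return tuple(indices)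
-- ===== Notes on version B (the rewrite author's own statement) =====
-- stated objective: faster
-- what changed: Replaces the repeated list.index scans with None-marking of consumed slots by a frequency table of the discards and a single in-order pass over the hand positions, which also removes the final sort.
import Mathlib
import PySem

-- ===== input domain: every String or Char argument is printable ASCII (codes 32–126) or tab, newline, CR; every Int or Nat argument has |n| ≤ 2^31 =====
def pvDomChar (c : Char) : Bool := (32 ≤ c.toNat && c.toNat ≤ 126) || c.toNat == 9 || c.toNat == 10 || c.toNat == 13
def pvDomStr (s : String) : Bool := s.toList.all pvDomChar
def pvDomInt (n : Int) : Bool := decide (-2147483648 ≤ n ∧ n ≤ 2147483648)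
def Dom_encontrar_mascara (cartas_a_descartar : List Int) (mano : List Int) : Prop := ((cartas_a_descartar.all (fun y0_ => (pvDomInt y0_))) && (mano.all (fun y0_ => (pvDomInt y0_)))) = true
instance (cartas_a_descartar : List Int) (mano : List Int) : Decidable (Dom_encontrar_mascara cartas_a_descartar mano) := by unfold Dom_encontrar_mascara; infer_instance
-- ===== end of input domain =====

-- B replaces A's repeated .index scans with None-marking of used slots by a frequency
-- table of the discards and one in-order pass over the hand positions (objective: idiomatic).

-- ===== PORT A =====
-- one iteration of A's 'for carta in cartas_a_descartar' loop (state: indices, mano_copia)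
def pvStepA (st : List Int × List (Option Int)) (carta : Int) : List Int × List (Option Int) :=
  match PySem.List.index? st.2 (some carta) with
  | some idx => (st.1 ++ [(idx : Int)], st.2.set idx none)
  | none => st

def encontrar_mascara (cartas_a_descartar : List Int) (mano : List Int) : List Int :=
  let res := cartas_a_descartar.foldl pvStepA ([], mano.map some)
  PySem.List.sorted res.1 (fun x => x) false

-- ===== PORT B =====
-- B's frequency table and one iteration of B's 'for i, carta in enumerate(mano)' loop
def pvStepB (st : List Int × PySem.Dict Int Int) (p : Int × Int) : List Int × PySem.Dict Int Int :=
  if st.2.getD p.2 0 > 0 then (st.1 ++ [p.1], st.2.insert p.2 (st.2.getD p.2 0 - 1)) else st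

def encontrar_mascara_alt (cartas_a_descartar : List Int) (mano : List Int) : List Int :=
  let restante := cartas_a_descartar.foldl (fun d c => d.insert c (d.getD c 0 + 1)) PySem.Dict.empty
  let res := (PySem.List.enumerate mano 0).foldl pvStepB ([], restante)
  res.1

-- ===== PRECONDITION & SPEC =====
def Spec_encontrar_mascara (cartas_a_descartar : List Int) (mano : List Int) (out : List Int) : Prop := out = encontrar_mascara_alt cartas_a_descartar mano
instance (cartas_a_descartar : List Int) (mano : List Int) (out : List Int) : Decidable (Spec_encontrar_mascara cartas_a_descartar mano out) := by unfold Spec_encontrar_mascara; infer_instance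

-- ===== CLAIM (what is proved, stated in full; the proofs are below) =====
def Claim_equal_encontrar_mascara : Prop := ∀ (cartas_a_descartar : List Int) (mano : List Int), Dom_encontrar_mascara cartas_a_descartar mano → Spec_encontrar_mascara cartas_a_descartar mano (encontrar_mascara cartas_a_descartar mano)

-- ===== LEMMAS AND PROOFS =====
-- pvRk mano i = rank of position i: how many of the first i+1 cards equal mano[i].
-- pvMask mano u = A's mano_copia after, for each card c, the first u c occurrences were
-- consumed; pvP mano u x = x is a consumed position under budget u.

def pvRk (mano : List Int) (i : Nat) : Nat := (mano.take (i+1)).count (mano.getD i 0)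

def pvMask (mano : List Int) (u : Int → Nat) : List (Option Int) :=
  mano.mapIdx (fun i x => if (mano.take (i+1)).count x ≤ u x then none else some x)

def pvP (mano : List Int) (u : Int → Nat) (x : Int) : Prop :=
  ∃ i : Nat, i < mano.length ∧ x = (i : Int) ∧ pvRk mano i ≤ u (mano.getD i 0)

theorem pv_count_take_mono (l : List Int) (c : Int) {a b : Nat} (h : a ≤ b) :
    (l.take a).count c ≤ (l.take b).count c := by
  have : l.take a = (l.take b).take a := by rw [List.take_take, Nat.min_eq_left h]
  rw [this]
  exact (List.take_sublist _ _).count_le _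

theorem pv_rk_eq (mano : List Int) (i : Nat) (h : i < mano.length) :
    pvRk mano i = (mano.take i).count (mano.getD i 0) + 1 := by
  unfold pvRk
  have ht : mano.take (i+1) = mano.take i ++ [mano[i]] := by
    rw [List.take_add_one, List.getElem?_eq_getElem h]; rfl
  rw [ht, List.count_append]
  simp [List.getD, List.getElem?_eq_getElem h]

theorem pv_rk_pos (mano : List Int) (i : Nat) (h : i < mano.length) : 1 ≤ pvRk mano i := by
  rw [pv_rk_eq mano i h]; omega

theorem pv_rk_lt_rk (mano : List Int) {i j : Nat} (hij : i < j) (hj : j < mano.length)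
    (hc : mano.getD i 0 = mano.getD j 0) : pvRk mano i < pvRk mano j := by
  rw [pv_rk_eq mano j hj]
  have h1 : pvRk mano i ≤ (mano.take j).count (mano.getD j 0) := by
    rw [← hc]; exact pv_count_take_mono mano _ (by omega)
  omega

theorem pv_rk_inj (mano : List Int) {i j : Nat} (hi : i < mano.length) (hj : j < mano.length)
    (hc : mano.getD i 0 = mano.getD j 0) (hr : pvRk mano i = pvRk mano j) : i = j := by
  rcases lt_trichotomy i j with h | h | h
  · exact absurd hr (Nat.ne_of_lt (pv_rk_lt_rk mano h hj hc))
  · exact h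
  · exact absurd hr.symm (Nat.ne_of_lt (pv_rk_lt_rk mano h hi hc.symm))

theorem pv_getElem_mask (mano : List Int) (u : Int → Nat) (i : Nat) (h : i < mano.length) :
    (pvMask mano u)[i]'(by simpa [pvMask] using h)
      = if pvRk mano i ≤ u (mano.getD i 0) then none else some (mano.getD i 0) := by
  unfold pvMask pvRk
  simp [List.getElem_mapIdx, List.getD, List.getElem?_eq_getElem h]

theorem pv_length_mask (mano : List Int) (u : Int → Nat) : (pvMask mano u).length = mano.length := by
  simp [pvMask]

theorem pv_mask_zero (mano : List Int) : pvMask mano (fun _ => 0) = mano.map some := by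
  apply List.ext_getElem (by simp [pv_length_mask])
  intro i h1 h2
  have hi : i < mano.length := by simpa [pv_length_mask] using h1
  rw [pv_getElem_mask mano _ i hi]
  have := pv_rk_pos mano i hi
  simp [List.getD, List.getElem?_eq_getElem hi]
  omega

theorem pv_occ_exists (l : List Int) (c : Int) (m : Nat) (h : m < l.count c) :
    ∃ i, i < l.length ∧ l.getD i 0 = c ∧ (l.take (i+1)).count c = m + 1 := by
  induction l generalizing m with
  | nil => simp at h
  | cons x xs ih =>
    by_cases hx : x = c
    · subst hx
      cases m with
      | zero => exact ⟨0, by simp, by simp [List.getD], by simp⟩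
      | succ m' =>
        have h' : m' < xs.count x := by simp [List.count_cons_self] at h; omega
        obtain ⟨i, hi, hc, hcnt⟩ := ih m' h'
        exact ⟨i + 1, by simp; omega, by simpa [List.getD] using hc,
          by simp [List.take_succ_cons, List.count_cons_self, hcnt]⟩
    · have h' : m < xs.count c := by simpa [List.count_cons_of_ne (by simpa using hx)] using h
      obtain ⟨i, hi, hc, hcnt⟩ := ih m h'
      exact ⟨i + 1, by simp; omega, by simpa [List.getD] using hc,
        by simp [List.take_succ_cons, List.count_cons_of_ne (by simpa using hx), hcnt]⟩

theorem pv_mem_mask (mano : List Int) (u : Int → Nat) (c : Int) :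
    some c ∈ pvMask mano u ↔ ∃ i, i < mano.length ∧ mano.getD i 0 = c ∧ u c < pvRk mano i := by
  rw [List.mem_iff_getElem]
  constructor
  · rintro ⟨i, hi, hv⟩
    have hi' : i < mano.length := by simpa [pv_length_mask] using hi
    rw [pv_getElem_mask mano u i hi'] at hv
    split at hv
    · simp at hv
    · rename_i hlt
      have hvv := Option.some.inj hv
      exact ⟨i, hi', hvv.symm ▸ rfl, by rw [← hvv]; omega⟩
  · rintro ⟨i, hi, hc, hlt⟩
    refine ⟨i, by simpa [pv_length_mask] using hi, ?_⟩
    rw [pv_getElem_mask mano u i hi, hc]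
    rw [if_neg (by omega)]

theorem pv_index?_mask_none (mano : List Int) (u : Int → Nat) (c : Int)
    (h : mano.count c ≤ u c) : PySem.List.index? (pvMask mano u) (some c) = none := by
  rw [PySem.List.index?_eq_none_iff]
  rw [pv_mem_mask]
  rintro ⟨i, hi, hc, hlt⟩
  have : pvRk mano i ≤ mano.count c := by
    unfold pvRk
    rw [hc]
    calc ((mano.take (i+1)).count c) ≤ (mano.take mano.length).count c :=
          pv_count_take_mono mano c (by omega)
      _ = mano.count c := by simp
  omega

theorem pv_index?_mask_some (mano : List Int) (u : Int → Nat) (c : Int)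
    (h : u c < mano.count c) :
    ∃ i, i < mano.length ∧ mano.getD i 0 = c ∧ pvRk mano i = u c + 1 ∧
      PySem.List.index? (pvMask mano u) (some c) = some i := by
  obtain ⟨i, hi, hc, hcnt⟩ := pv_occ_exists mano c (u c) h
  have hrk : pvRk mano i = u c + 1 := by unfold pvRk; rw [hc]; exact hcnt
  refine ⟨i, hi, hc, hrk, ?_⟩
  rw [PySem.List.index?_eq_some_iff]
  have hlen : i < (pvMask mano u).length := by simpa [pv_length_mask] using hi
  refine ⟨(pvMask mano u).take i, (pvMask mano u).drop (i+1), ?_, by simp [pv_length_mask]; omega, ?_⟩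
  · have h1 := List.take_append_drop i (pvMask mano u)
    have h2 : (pvMask mano u).drop i = (pvMask mano u)[i] :: (pvMask mano u).drop (i+1) :=
      List.drop_eq_getElem_cons hlen
    have h3 : (pvMask mano u)[i] = some c := by
      rw [pv_getElem_mask mano u i hi, hc, hrk]
      simp
    conv_lhs => rw [← h1, h2, h3]
  · intro hmem
    rw [List.mem_take_iff_getElem] at hmem
    obtain ⟨j, hj, hv⟩ := hmem
    have hj' : j < i := by omega
    have hji : j < mano.length := by omega
    rw [pv_getElem_mask mano u j hji] at hv
    split at hv
    · simp at hv
    · rename_i hlt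
      have hcj : mano.getD j 0 = c := by simpa using hv
      have := pv_rk_lt_rk mano hj' hi (by rw [hcj, hc])
      rw [hrk] at this
      rw [hcj] at hlt
      omega

theorem pv_set_mask (mano : List Int) (u : Int → Nat) (i : Nat) (hi : i < mano.length)
    (hrk : pvRk mano i = u (mano.getD i 0) + 1) :
    (pvMask mano u).set i none
      = pvMask mano (Function.update u (mano.getD i 0) (u (mano.getD i 0) + 1)) := by
  apply List.ext_getElem (by simp [pv_length_mask])
  intro j h1 h2
  have hj : j < mano.length := by simpa [pv_length_mask] using h2
  rw [List.getElem_set,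
    pv_getElem_mask mano (Function.update u (mano.getD i 0) (u (mano.getD i 0) + 1)) j hj]
  by_cases hij : i = j
  · subst hij
    rw [if_pos rfl, Function.update_self]
    rw [if_pos (by omega)]
  · rw [if_neg hij, pv_getElem_mask mano u j hj]
    by_cases hcc : mano.getD j 0 = mano.getD i 0
    · rw [hcc, Function.update_self]
      by_cases hr : pvRk mano j ≤ u (mano.getD i 0)
      · rw [if_pos hr, if_pos (by omega)]
      · have hne : pvRk mano j ≠ u (mano.getD i 0) + 1 := by
          intro he
          exact hij (pv_rk_inj mano hi hj hcc.symm (by omega))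
        rw [if_neg hr, if_neg (by omega)]
    · rw [Function.update_of_ne hcc]

theorem pv_P_congr (mano : List Int) (u1 u2 : Int → Nat)
    (h : ∀ i, i < mano.length → (pvRk mano i ≤ u1 (mano.getD i 0) ↔ pvRk mano i ≤ u2 (mano.getD i 0)))
    (x : Int) : pvP mano u1 x ↔ pvP mano u2 x := by
  unfold pvP
  constructor
  · rintro ⟨i, hi, hx, hr⟩; exact ⟨i, hi, hx, (h i hi).1 hr⟩
  · rintro ⟨i, hi, hx, hr⟩; exact ⟨i, hi, hx, (h i hi).2 hr⟩

theorem pv_rk_le_count (mano : List Int) (i : Nat) (h : i < mano.length) :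
    pvRk mano i ≤ mano.count (mano.getD i 0) := by
  unfold pvRk
  calc ((mano.take (i+1)).count (mano.getD i 0)) ≤ (mano.take mano.length).count (mano.getD i 0) :=
        pv_count_take_mono mano _ (by omega)
    _ = _ := by simp

theorem pv_Aloop (mano : List Int) (cs : List Int) :
    ∀ (u : Int → Nat) (acc : List Int),
    acc.Nodup → (∀ x, x ∈ acc ↔ pvP mano u x) →
    (cs.foldl pvStepA (acc, pvMask mano u)).1.Nodup ∧
    ∀ x, x ∈ (cs.foldl pvStepA (acc, pvMask mano u)).1 ↔ pvP mano (fun c => u c + cs.count c) x := by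
  induction cs with
  | nil =>
    intro u acc hnd hmem
    simpa using ⟨hnd, hmem⟩
  | cons c cs ih =>
    intro u acc hnd hmem
    rw [List.foldl_cons]
    by_cases h : mano.count c ≤ u c
    · have hstep : pvStepA (acc, pvMask mano u) c = (acc, pvMask mano u) := by
        unfold pvStepA
        rw [pv_index?_mask_none mano u c h]
      rw [hstep]
      obtain ⟨h1, h2⟩ := ih u acc hnd hmem
      refine ⟨h1, fun x => (h2 x).trans (pv_P_congr mano _ _ ?_ x)⟩
      intro i hi
      by_cases hcc : mano.getD i 0 = c
      · have := pv_rk_le_count mano i hi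
        rw [hcc] at this ⊢
        constructor <;> intro <;> omega
      · simp only [List.count_cons, beq_eq_false_iff_ne.mpr (fun he => hcc he.symm)]
        simp
    · rw [Nat.not_le] at h
      obtain ⟨i, hi, hc, hrk, hidx⟩ := pv_index?_mask_some mano u c h
      have hstep : pvStepA (acc, pvMask mano u) c
          = (acc ++ [(i : Int)], pvMask mano (Function.update u c (u c + 1))) := by
        simp only [pvStepA, hidx]
        rw [← hc] at hrk ⊢
        rw [pv_set_mask mano u i hi hrk]
      rw [hstep]
      have hnotin : (i : Int) ∉ acc := by
        intro hin
        obtain ⟨i', hi', hx, hr⟩ := (hmem _).1 hin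
        have : i' = i := by exact_mod_cast hx.symm
        subst this
        rw [hc] at hr
        omega
      have hnd' : (acc ++ [(i : Int)]).Nodup := by
        rw [List.nodup_append]
        refine ⟨hnd, List.nodup_singleton _, ?_⟩
        intro a ha b hb
        rw [List.mem_singleton] at hb
        subst hb
        intro he
        exact hnotin (he ▸ ha)
      have hmem' : ∀ x, x ∈ acc ++ [(i : Int)] ↔ pvP mano (Function.update u c (u c + 1)) x := by
        intro x
        rw [List.mem_append, List.mem_singleton]
        constructor
        · rintro (hin | rfl)
          · obtain ⟨i', hi', hx, hr⟩ := (hmem _).1 hin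
            refine ⟨i', hi', hx, ?_⟩
            by_cases hcc : mano.getD i' 0 = c
            · rw [hcc, Function.update_self]; rw [hcc] at hr; omega
            · rwa [Function.update_of_ne hcc]
          · exact ⟨i, hi, rfl, by rw [hc, Function.update_self]; omega⟩
        · rintro ⟨i', hi', hx, hr⟩
          by_cases hcc : mano.getD i' 0 = c
          · rw [hcc, Function.update_self] at hr
            by_cases hle : pvRk mano i' ≤ u c
            · exact Or.inl ((hmem _).2 ⟨i', hi', hx, by rw [hcc]; exact hle⟩)
            · have : i' = i := pv_rk_inj mano hi' hi (by rw [hcc, hc]) (by omega)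
              subst this
              exact Or.inr hx
          · exact Or.inl ((hmem _).2 ⟨i', hi', hx, by rwa [Function.update_of_ne hcc] at hr⟩)
      obtain ⟨h1, h2⟩ := ih (Function.update u c (u c + 1)) (acc ++ [(i : Int)]) hnd' hmem'
      have hfe : (fun d => Function.update u c (u c + 1) d + cs.count d)
          = (fun d => u d + (c :: cs).count d) := by
        funext d
        by_cases hdc : d = c
        · subst hdc
          simp only [Function.update_self, List.count_cons]
          simp
          omega
        · simp only [Function.update_of_ne hdc, List.count_cons,
            beq_eq_false_iff_ne.mpr (fun he => hdc he.symm)]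
          simp
      refine ⟨h1, fun x => ?_⟩
      rw [h2 x, hfe]

theorem pv_Bloop (cartas mano : List Int) :
    ∀ (l pre acc : List Int) (d : PySem.Dict Int Int),
    mano = pre ++ l →
    (∀ c, d.getD c 0 = (cartas.count c : Int) - min (cartas.count c) (pre.count c)) →
    ((PySem.List.enumerate l (pre.length : Int)).foldl pvStepB (acc, d)).1
      = acc ++ ((List.range' pre.length l.length).filter
          (fun i => decide (pvRk mano i ≤ cartas.count (mano.getD i 0)))).map (fun i : Nat => (i : Int)) := by
  intro l
  induction l with
  | nil => intro pre acc d hm hd; simp [PySem.List.enumerate]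
  | cons x xs ih =>
    intro pre acc d hm hd
    rw [PySem.List.enumerate_cons, List.foldl_cons]
    have hpre : pre.length < mano.length := by subst hm; simp
    have hgd : mano.getD pre.length 0 = x := by
      subst hm; simp [List.getD, List.getElem?_append_right (Nat.le_refl _)]
    have hrkp : pvRk mano pre.length = pre.count x + 1 := by
      rw [pv_rk_eq mano pre.length hpre, hgd]
      congr 1
      subst hm
      rw [List.take_left']
      rfl
    have hcond : (d.getD x 0 > 0) ↔ (pvRk mano pre.length ≤ cartas.count (mano.getD pre.length 0)) := by
      rw [hd x, hgd, hrkp]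
      omega
    have hrange : List.range' pre.length (xs.length + 1)
        = pre.length :: List.range' (pre.length + 1) xs.length := List.range'_succ
    by_cases hs : d.getD x 0 > 0
    · have hstep : pvStepB (acc, d) ((pre.length : Int), x)
          = (acc ++ [(pre.length : Int)], d.insert x (d.getD x 0 - 1)) := by
        simp only [pvStepB, if_pos hs]
      rw [hstep]
      have hm' : mano = (pre ++ [x]) ++ xs := by simpa using hm
      have hd' : ∀ c, (d.insert x (d.getD x 0 - 1)).getD c 0
          = (cartas.count c : Int) - min (cartas.count c) ((pre ++ [x]).count c) := by
        intro c
        rw [PySem.Dict.getD_insert]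
        by_cases hcx : c = x
        · subst hcx
          rw [if_pos rfl, hd c]
          have : cartas.count c > pre.count c := by
            have := hd c; rw [this] at hs; omega
          simp [List.count_append]
          omega
        · rw [if_neg hcx, hd c]
          simp [List.count_append, List.count_singleton]
          rw [if_neg (fun he => hcx he.symm)]
          simp
      have := ih (pre ++ [x]) (acc ++ [(pre.length : Int)]) (d.insert x (d.getD x 0 - 1)) hm' hd'
      simp only [List.length_append, List.length_singleton] at this
      rw [show ((pre.length : Int) + 1) = (((pre.length + 1 : Nat)) : Int) by push_cast; ring]
      rw [this]
      rw [List.length_cons, hrange, List.filter_cons]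
      rw [if_pos (by rw [decide_eq_true_eq]; exact hcond.1 hs)]
      simp
    · have hstep : pvStepB (acc, d) ((pre.length : Int), x) = (acc, d) := by
        simp only [pvStepB, if_neg hs]
      rw [hstep]
      have hm' : mano = (pre ++ [x]) ++ xs := by simpa using hm
      have hd' : ∀ c, d.getD c 0
          = (cartas.count c : Int) - min (cartas.count c) ((pre ++ [x]).count c) := by
        intro c
        by_cases hcx : c = x
        · subst hcx
          rw [hd c]
          have : (cartas.count c : Int) ≤ pre.count c := by
            have := hd c; rw [this] at hs; omega
          simp [List.count_append]
          omega
        · rw [hd c]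
          simp [List.count_append, List.count_singleton]
          rw [if_neg (fun he => hcx he.symm)]
          simp
      have := ih (pre ++ [x]) acc d hm' hd'
      simp only [List.length_append, List.length_singleton] at this
      rw [show ((pre.length : Int) + 1) = (((pre.length + 1 : Nat)) : Int) by push_cast; ring]
      rw [this]
      rw [List.length_cons, hrange, List.filter_cons]
      rw [if_neg (by rw [decide_eq_true_eq]; exact fun hh => hs (hcond.2 hh))]

theorem pv_main (cartas mano : List Int) :
    encontrar_mascara cartas mano = encontrar_mascara_alt cartas mano := by
  have hd0 : ∀ c, (cartas.foldl (fun d c => d.insert c (d.getD c 0 + 1)) PySem.Dict.empty).getD c 0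
      = (cartas.count c : Int) - min (cartas.count c) (([] : List Int).count c) := by
    intro c
    rw [PySem.Dict.getD_foldl_insert_add_one, PySem.Dict.getD_empty]
    simp
  have hB := pv_Bloop cartas mano mano [] []
    (cartas.foldl (fun d c => d.insert c (d.getD c 0 + 1)) PySem.Dict.empty) (by simp) hd0
  simp only [List.length_nil, Nat.cast_zero, List.nil_append] at hB
  have hmem0 : ∀ x : Int, x ∈ ([] : List Int) ↔ pvP mano (fun _ => 0) x := by
    intro x
    simp only [List.not_mem_nil, false_iff]
    rintro ⟨i, hi, hx, hr⟩
    have h1 := pv_rk_pos mano i hi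
    simp only at hr
    omega
  have hA := pv_Aloop mano cartas (fun _ => 0) [] List.nodup_nil hmem0
  obtain ⟨hnd, hmemA⟩ := hA
  unfold encontrar_mascara encontrar_mascara_alt
  simp only
  rw [← pv_mask_zero mano, hB]
  set Bres := ((List.range' 0 mano.length).filter
      (fun i => decide (pvRk mano i ≤ cartas.count (mano.getD i 0)))).map (fun i : Nat => (i : Int)) with hBres
  have hrr : (List.range' 0 mano.length).Pairwise (· < ·) := List.pairwise_lt_range'
  have hpairN := hrr.filter (fun i => decide (pvRk mano i ≤ cartas.count (mano.getD i 0)))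
  have hpair : Bres.Pairwise (fun a b : Int => a < b) := by
    rw [hBres, List.pairwise_map]
    exact hpairN.imp (fun h => by exact_mod_cast h)
  have hndB : Bres.Nodup := hpair.imp (fun h => ne_of_lt h)
  have hmemB : ∀ x : Int, x ∈ Bres ↔ pvP mano (fun c => 0 + cartas.count c) x := by
    intro x
    rw [hBres]
    simp only [List.mem_map, List.mem_filter, List.mem_range'_1, decide_eq_true_eq]
    unfold pvP
    constructor
    · rintro ⟨i, ⟨⟨_, hi⟩, hr⟩, rfl⟩
      refine ⟨i, by omega, rfl, ?_⟩
      simp only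
      omega
    · rintro ⟨i, hi, rfl, hr⟩
      simp only at hr
      exact ⟨i, ⟨⟨by omega, by omega⟩, by omega⟩, rfl⟩
  have hperm : Bres.Perm ((cartas.foldl pvStepA ([], pvMask mano (fun _ => 0))).1) := by
    rw [List.perm_ext_iff_of_nodup hndB hnd]
    intro x
    rw [hmemB x, hmemA x]
  exact PySem.List.sorted_eq_of_perm_of_pairwise_lt _ _ _ hperm hpair

-- ===== VERDICT (by name: the statement is the Claim_ definition above) =====
theorem encontrar_mascara_spec : Claim_equal_encontrar_mascara := by
  intro cartas mano _
  unfold Spec_encontrar_mascara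
  exact pv_main cartas mano
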